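-- pv_equiv track=rewrite | github.com/teddyoweh/Sayless | sayless/cli/ai_providers.py | truncate_diff_intelligently
-- ===== SOURCE A (Python) =====
-- def truncate_diff_intelligently(diff: str, max_tokens: int = 60000) -> str:
--     """Intelligently truncate diff to fit within token limits"""
--     max_chars = max_tokens * 4  # Rough character estimate
--
--     if len(diff) <= max_chars:
--         return diff
--
--     lines = diff.split('\n')
--     truncated_lines = []
--     current_length = 0
--
--     # Prioritize added/removed lines over context
--     for line in lines:
--         if current_length + len(line) + 1 > max_chars:
--             truncated_lines.append("... [DIFF TRUNCATED FOR LENGTH] ...")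
--             break
--         truncated_lines.append(line)
--         current_length += len(line) + 1
--
--     return '\n'.join(truncated_lines)
-- ===== SOURCE B (Python) =====
-- def truncate_diff_intelligently(diff: str, max_tokens: int = 60000) -> str:
--     """Intelligently truncate diff to fit within token limits"""
--     max_chars = max_tokens * 4
--
--     if len(diff) <= max_chars:
--         return diff
--
--     lines = diff.split('\n')
--     # Prefix table: prefix[i] = total cost of keeping lines[0..i] (each line + its newline)
--     prefix = []
--     total = 0
--     for line in lines:
--         total += len(line) + 1
--         prefix.append(total)
--     # Binary search for the number of leading lines whose cumulative cost fits the budget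
--     lo, hi = 0, len(prefix)
--     while lo < hi:
--         mid = (lo + hi) // 2
--         if prefix[mid] <= max_chars:
--             lo = mid + 1
--         else:
--             hi = mid
--     return '\n'.join(lines[:lo] + ["... [DIFF TRUNCATED FOR LENGTH] ..."])
-- ===== Notes on version B (the rewrite author's own statement) =====
-- stated objective: alternative
-- what changed: Replaces A's scan-and-break running-total loop by a precomputed prefix-sum cost table plus a binary search for the cutoff index, then joins lines[:k] with the marker.
import Mathlib
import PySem

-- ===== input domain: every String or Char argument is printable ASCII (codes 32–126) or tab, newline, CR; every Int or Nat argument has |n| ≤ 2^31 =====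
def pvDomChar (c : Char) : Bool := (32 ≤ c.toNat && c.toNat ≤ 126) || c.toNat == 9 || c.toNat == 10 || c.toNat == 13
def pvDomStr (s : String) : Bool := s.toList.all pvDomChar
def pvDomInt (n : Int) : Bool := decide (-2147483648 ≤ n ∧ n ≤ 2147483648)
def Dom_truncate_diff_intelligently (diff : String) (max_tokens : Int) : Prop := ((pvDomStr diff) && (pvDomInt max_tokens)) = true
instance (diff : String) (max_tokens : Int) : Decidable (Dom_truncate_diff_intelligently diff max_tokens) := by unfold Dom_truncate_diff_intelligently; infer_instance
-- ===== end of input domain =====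

-- B replaces A's scan-and-break accumulator loop by a precomputed prefix-cost table plus a
-- binary search for the cutoff index (objective: alternative decomposition, same O(n) overall).

-- ===== PORT A =====
-- the for-loop of A: scan lines, keep a running total, break with the marker on overflow
def tdiA_loop (maxc : Int) : List String → Int → List String
  | [], _ => []
  | l :: rest, cur =>
    if cur + PySem.Str.len l + 1 > maxc then ["... [DIFF TRUNCATED FOR LENGTH] ..."]
    else l :: tdiA_loop maxc rest (cur + PySem.Str.len l + 1)

def truncate_diff_intelligently (diff : String) (max_tokens : Int) : String :=
  let max_chars := max_tokens * 4
  if PySem.Str.len diff ≤ max_chars then diff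
  else
    -- diff.split('\n'): the separator "\n" is nonempty, so split? is always `some`; getD [] is exact
    let lines := (PySem.Str.split? diff "\n").getD []
    PySem.Str.join "\n" (tdiA_loop max_chars lines 0)

-- ===== PORT B =====
-- Source B's prefix table: prefix[i] = total cost of keeping lines[0..i]
def tdiB_prefix : List String → Int → List Int
  | [], _ => []
  | l :: rest, total => (total + PySem.Str.len l + 1) :: tdiB_prefix rest (total + PySem.Str.len l + 1)

-- Source B's binary search: number of leading prefix entries ≤ max_chars
-- (prefix[mid]: mid < hi ≤ len inside the loop, so the Python index never raises; getD 0 is exact)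
def tdiB_search (p : List Int) (maxc : Int) (lo hi : Nat) : Nat :=
  if _h : lo < hi then
    let mid := (lo + hi) / 2
    if p.getD mid 0 ≤ maxc then tdiB_search p maxc (mid + 1) hi
    else tdiB_search p maxc lo mid
  else lo
termination_by hi - lo
decreasing_by all_goals omega

def truncate_diff_intelligently_alt (diff : String) (max_tokens : Int) : String :=
  let max_chars := max_tokens * 4
  if PySem.Str.len diff ≤ max_chars then diff
  else
    -- diff.split('\n'): the separator "\n" is nonempty, so split? is always `some`; getD [] is exact
    let lines := (PySem.Str.split? diff "\n").getD []
    let pre := tdiB_prefix lines 0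
    let k := tdiB_search pre max_chars 0 pre.length
    PySem.Str.join "\n" (lines.take k ++ ["... [DIFF TRUNCATED FOR LENGTH] ..."])

-- ===== PRECONDITION & SPEC =====
def Spec_truncate_diff_intelligently (diff : String) (max_tokens : Int) (out : String) : Prop := out = truncate_diff_intelligently_alt diff max_tokens
instance (diff : String) (max_tokens : Int) (out : String) : Decidable (Spec_truncate_diff_intelligently diff max_tokens out) := by unfold Spec_truncate_diff_intelligently; infer_instance

-- ===== CLAIM (what is proved, stated in full; the proofs are below) =====
def Claim_equal_truncate_diff_intelligently : Prop := ∀ (diff : String) (max_tokens : Int), Dom_truncate_diff_intelligently diff max_tokens → Spec_truncate_diff_intelligently diff max_tokens (truncate_diff_intelligently diff max_tokens)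

-- ===== LEMMAS AND PROOFS =====

lemma tdi_len_nonneg (s : String) : 0 ≤ PySem.Str.len s := by
  simp [PySem.Str.len_eq]

lemma tdiB_prefix_length : ∀ (ls : List String) (cur : Int), (tdiB_prefix ls cur).length = ls.length := by
  intro ls
  induction ls with
  | nil => intro cur; simp [tdiB_prefix]
  | cons l rest ih => intro cur; simp [tdiB_prefix, ih]

lemma tdiB_prefix_lb : ∀ (ls : List String) (cur x : Int), x ∈ tdiB_prefix ls cur → cur < x := by
  intro ls
  induction ls with
  | nil => intro cur x hx; simp [tdiB_prefix] at hx
  | cons l rest ih =>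
    intro cur x hx
    simp only [tdiB_prefix, List.mem_cons] at hx
    rcases hx with h | h
    · have := tdi_len_nonneg l; omega
    · have := ih _ _ h
      have := tdi_len_nonneg l; omega

lemma tdiB_prefix_pairwise : ∀ (ls : List String) (cur : Int), (tdiB_prefix ls cur).Pairwise (· < ·) := by
  intro ls
  induction ls with
  | nil => intro cur; simp [tdiB_prefix]
  | cons l rest ih =>
    intro cur
    simp only [tdiB_prefix, List.pairwise_cons]
    exact ⟨fun x hx => tdiB_prefix_lb _ _ _ hx, ih _⟩

lemma tdiB_prefix_mono (ls : List String) (cur : Int) {i j : Nat}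
    (hi : i < (tdiB_prefix ls cur).length) (hj : j < (tdiB_prefix ls cur).length) (hij : i ≤ j) :
    (tdiB_prefix ls cur)[i] ≤ (tdiB_prefix ls cur)[j] := by
  rcases Nat.lt_or_ge i j with h | h
  · exact le_of_lt ((List.pairwise_iff_getElem.mp (tdiB_prefix_pairwise ls cur)) i j hi hj h)
  · have : i = j := le_antisymm hij h
    subst this; exact le_rfl

def tdiSum (ls : List String) : Int := (ls.map (fun l => PySem.Str.len l + 1)).sum

lemma tdiB_prefix_mem_sum : ∀ (ls : List String) (cur : Int), ls ≠ [] →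
    (cur + tdiSum ls) ∈ tdiB_prefix ls cur := by
  intro ls
  induction ls with
  | nil => intro cur h; exact absurd rfl h
  | cons l rest ih =>
    intro cur _
    rcases eq_or_ne rest [] with hr | hr
    · subst hr
      simp [tdiB_prefix, tdiSum]; ring
    · have := ih (cur + PySem.Str.len l + 1) hr
      simp only [tdiB_prefix, List.mem_cons]
      right
      have : cur + PySem.Str.len l + 1 + tdiSum rest = cur + tdiSum (l :: rest) := by
        simp [tdiSum]; ring
      rw [← this]
      exact ih (cur + PySem.Str.len l + 1) hr

lemma tdi_takeWhile_sat {α : Type} (p : α → Bool) : ∀ (l : List α) (i : Nat)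
    (h : i < l.length), i < (l.takeWhile p).length → p l[i] = true := by
  intro l
  induction l with
  | nil => intro i h; simp at h
  | cons a t ih =>
    intro i h hi
    by_cases hp : p a
    · cases i with
      | zero => simpa using hp
      | succ n =>
        simp only [List.takeWhile_cons, hp, if_true, List.length_cons] at hi
        exact ih n (by simpa using h) (by omega)
    · simp [hp] at hi

lemma tdi_takeWhile_stop {α : Type} (p : α → Bool) : ∀ (l : List α)
    (h : (l.takeWhile p).length < l.length), p (l[(l.takeWhile p).length]'h) = false := by
  intro l
  induction l with
  | nil => intro h; simp at h
  | cons a t ih =>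
    intro h
    by_cases hp : p a
    · simp only [List.takeWhile_cons, hp, if_true, List.length_cons] at h ⊢
      simpa using ih (by omega)
    · simp [hp] at h ⊢

lemma tdiB_cut_eq (p : List Int) (maxc : Int) (lo : Nat) (hlo : lo ≤ p.length)
    (hlow : ∀ i (h : i < p.length), i < lo → p[i] ≤ maxc)
    (hhigh : ∀ i (h : i < p.length), lo ≤ i → maxc < p[i]) :
    lo = (p.takeWhile (fun x => decide (x ≤ maxc))).length := by
  have htle : (p.takeWhile (fun x => decide (x ≤ maxc))).length ≤ p.length :=
    (List.takeWhile_prefix _).length_le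
  rcases Nat.lt_trichotomy lo ((p.takeWhile (fun x => decide (x ≤ maxc))).length) with h | h | h
  · have h1 := hhigh lo (by omega) (by omega)
    have h2 := tdi_takeWhile_sat (fun x => decide (x ≤ maxc)) p lo (by omega) h
    simp only [decide_eq_true_eq] at h2
    omega
  · exact h
  · have h1 := hlow ((p.takeWhile (fun x => decide (x ≤ maxc))).length) (by omega) h
    have h2 := tdi_takeWhile_stop (fun x => decide (x ≤ maxc)) p (by omega)
    simp only [decide_eq_false_iff_not, not_le] at h2
    omega

lemma tdiB_search_spec (p : List Int) (maxc : Int)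
    (mono : ∀ i j (hi : i < p.length) (hj : j < p.length), i ≤ j → p[i] ≤ p[j]) :
    ∀ (fuel lo hi : Nat), hi - lo ≤ fuel → lo ≤ hi → hi ≤ p.length →
    (∀ i (h : i < p.length), i < lo → p[i] ≤ maxc) →
    (∀ i (h : i < p.length), lo ≤ i → hi ≤ i → maxc < p[i]) →
    tdiB_search p maxc lo hi = (p.takeWhile (fun x => decide (x ≤ maxc))).length := by
  intro fuel
  induction fuel with
  | zero =>
    intro lo hi hfuel hlohi hhi hlow hhigh
    have heq : lo = hi := by omega
    subst heq
    rw [tdiB_search, dif_neg (by omega)]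
    exact tdiB_cut_eq p maxc lo (by omega) hlow (fun i h hi => hhigh i h hi hi)
  | succ n ih =>
    intro lo hi hfuel hlohi hhi hlow hhigh
    rw [tdiB_search]
    by_cases hlt : lo < hi
    · rw [dif_pos hlt]
      show (if p.getD ((lo + hi) / 2) 0 ≤ maxc then tdiB_search p maxc ((lo + hi) / 2 + 1) hi
            else tdiB_search p maxc lo ((lo + hi) / 2))
          = (p.takeWhile (fun x => decide (x ≤ maxc))).length
      have hm1 : (lo + hi) / 2 < hi := by omega
      have hm2 : lo ≤ (lo + hi) / 2 := by omega
      have hmp : (lo + hi) / 2 < p.length := by omega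
      rw [List.getD_eq_getElem p 0 hmp]
      by_cases hc : p[(lo + hi) / 2] ≤ maxc
      · rw [if_pos hc]
        refine ih ((lo + hi) / 2 + 1) hi (by omega) (by omega) hhi ?_ ?_
        · intro i h hilt
          exact le_trans (mono i ((lo + hi) / 2) h hmp (by omega)) hc
        · intro i h hge hhi2
          exact hhigh i h (by omega) hhi2
      · rw [if_neg hc]
        refine ih lo ((lo + hi) / 2) (by omega) (by omega) (by omega) hlow ?_
        intro i h hge hmid
        exact lt_of_lt_of_le (by omega) (mono ((lo + hi) / 2) i hmp h hmid)
    · rw [dif_neg hlt]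
      have heq : lo = hi := by omega
      subst heq
      exact tdiB_cut_eq p maxc lo (by omega) hlow (fun i h hi => hhigh i h hi hi)

lemma tdi_go_sum (sep : List Char) (hsep : sep ≠ []) :
    ∀ (fuel : Nat) (l cur : List Char) (acc : List (List Char)), l.length < fuel →
    ((PySem.Chars.splitOn.go sep fuel l cur acc).map (fun q => (q.length : Int) + sep.length)).sum
      = ((acc.map (fun q => (q.length : Int) + sep.length)).sum + cur.length + l.length + sep.length) := by
  have hsl : 1 ≤ sep.length := List.length_pos_iff.mpr hsep
  intro fuel
  induction fuel with
  | zero => intro l cur acc h; omega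
  | succ n ih =>
    intro l cur acc h
    cases l with
    | nil =>
      simp [PySem.Chars.splitOn.go, List.map_reverse, List.sum_reverse]
      ring
    | cons c rest =>
      rw [PySem.Chars.splitOn.go]
      by_cases hpre : sep.isPrefixOf (c :: rest) = true
      · rw [if_pos hpre]
        have hple : sep.length ≤ (c :: rest).length :=
          (List.isPrefixOf_iff_prefix.mp hpre).length_le
        simp only [List.length_cons] at h hple
        have hlen : (List.drop sep.length (c :: rest)).length < n := by
          simp only [List.length_drop, List.length_cons]
          omega
        rw [ih _ [] (cur.reverse :: acc) hlen]
        simp only [List.map_cons, List.sum_cons, List.length_reverse, List.length_drop,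
          List.length_nil, List.length_cons]
        rw [Nat.cast_sub (by omega)]
        push_cast
        ring
      · rw [if_neg hpre]
        rw [ih rest (c :: cur) acc (by simp only [List.length_cons] at h; omega)]
        simp only [List.length_cons]
        push_cast
        ring

lemma tdi_split_eq (diff : String) :
    (PySem.Str.split? diff "\n").getD [] = (PySem.Chars.splitOn diff.toList ['\n']).map String.ofList := by
  have h : "\n".toList = ['\n'] := by decide
  simp [PySem.Str.split?, PySem.Chars.split?, h]

lemma tdi_splitOn_sum (s : List Char) :
    ((PySem.Chars.splitOn s ['\n']).map (fun q => (q.length : Int) + 1)).sum = s.length + 1 := by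
  have h := tdi_go_sum ['\n'] (by simp) (s.length + 1) s [] [] (by omega)
  simpa [PySem.Chars.splitOn] using h

lemma tdi_lines_sum (diff : String) :
    tdiSum ((PySem.Str.split? diff "\n").getD []) = PySem.Str.len diff + 1 := by
  rw [tdi_split_eq, tdiSum, List.map_map]
  have hf : ((fun l => PySem.Str.len l + 1) ∘ String.ofList) = fun q : List Char => (q.length : Int) + 1 := by
    funext q
    simp [PySem.Str.len_eq]
  rw [hf, tdi_splitOn_sum, PySem.Str.len_eq]

lemma tdi_lines_ne_nil (diff : String) : (PySem.Str.split? diff "\n").getD [] ≠ [] := by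
  intro h
  have hs := tdi_lines_sum diff
  rw [h] at hs
  simp [tdiSum] at hs
  have := tdi_len_nonneg diff
  omega

lemma tdiA_loop_eq (maxc : Int) : ∀ (ls : List String) (cur : Int),
    tdiA_loop maxc ls cur =
      (if ((tdiB_prefix ls cur).takeWhile (fun x => decide (x ≤ maxc))).length = ls.length then ls
       else ls.take ((tdiB_prefix ls cur).takeWhile (fun x => decide (x ≤ maxc))).length
              ++ ["... [DIFF TRUNCATED FOR LENGTH] ..."]) := by
  intro ls
  induction ls with
  | nil => intro cur; simp [tdiA_loop, tdiB_prefix]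
  | cons l rest ih =>
    intro cur
    simp only [tdiB_prefix]
    by_cases hc : cur + PySem.Str.len l + 1 ≤ maxc
    · rw [tdiA_loop, if_neg (by omega), ih, List.takeWhile_cons, if_pos (decide_eq_true hc)]
      simp only [List.length_cons]
      by_cases he : ((tdiB_prefix rest (cur + PySem.Str.len l + 1)).takeWhile
          (fun x => decide (x ≤ maxc))).length = rest.length
      · rw [if_pos he, if_pos (by omega)]
      · rw [if_neg he, if_neg (by omega), List.take_succ_cons, List.cons_append]
    · have hd : (decide (cur + PySem.Str.len l + 1 ≤ maxc)) = false := decide_eq_false hc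
      rw [tdiA_loop, if_pos (by omega), List.takeWhile_cons, hd]
      simp only [Bool.false_eq_true, if_false, List.length_nil, List.length_cons]
      rw [if_neg (by omega), List.take_zero, List.nil_append]

-- ===== VERDICT (by name: the statement is the Claim_ definition above) =====
theorem truncate_diff_intelligently_spec : Claim_equal_truncate_diff_intelligently := by
  intro diff max_tokens _
  unfold Spec_truncate_diff_intelligently
  simp only [truncate_diff_intelligently, truncate_diff_intelligently_alt]
  by_cases hle : PySem.Str.len diff ≤ max_tokens * 4
  · rw [if_pos hle, if_pos hle]
  · rw [if_neg hle, if_neg hle]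
    have hsearch := tdiB_search_spec (tdiB_prefix ((PySem.Str.split? diff "\n").getD []) 0)
      (max_tokens * 4) (fun i j hi hj hij => tdiB_prefix_mono _ 0 hi hj hij)
      (tdiB_prefix ((PySem.Str.split? diff "\n").getD []) 0).length 0
      (tdiB_prefix ((PySem.Str.split? diff "\n").getD []) 0).length
      (by omega) (by omega) le_rfl
      (fun i h h0 => absurd h0 (by omega))
      (fun i h _ h2 => absurd h (by omega))
    rw [tdiA_loop_eq, hsearch, if_neg ?hne]
    case hne =>
      intro h
      have hlen : ((tdiB_prefix ((PySem.Str.split? diff "\n").getD []) 0).takeWhile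
          (fun x => decide (x ≤ max_tokens * 4))).length
          = (tdiB_prefix ((PySem.Str.split? diff "\n").getD []) 0).length := by
        rw [h, tdiB_prefix_length]
      have heq := (List.takeWhile_prefix
        (l := tdiB_prefix ((PySem.Str.split? diff "\n").getD []) 0)
        (fun x => decide (x ≤ max_tokens * 4))).eq_of_length hlen
      have hmem : (0 + tdiSum ((PySem.Str.split? diff "\n").getD []))
          ∈ tdiB_prefix ((PySem.Str.split? diff "\n").getD []) 0 :=
        tdiB_prefix_mem_sum _ 0 (tdi_lines_ne_nil diff)
      rw [← heq] at hmem
      have hw := List.mem_takeWhile_imp hmem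
      simp only [decide_eq_true_eq] at hw
      have hsum := tdi_lines_sum diff
      omega
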